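-- pv_equiv track=rewrite | github.com/Gaurav-jo1/DSA_python | binary_search/searchInRotated.py | highN
-- ===== SOURCE A (Python) =====
-- def highN(arr):
--     start = 0
--     end = len(arr) - 1
--     while start <= end:
--         mid = start + (end - start) // 2
--         if arr[start] > arr[mid]:
--             end = mid
--         elif arr[start] < arr[mid]:
--             start = mid
--         else:
--             return mid
-- ===== SOURCE B (Python) =====
-- def highN(arr):
--     def go(start, length):
--         mid = start + length // 2
--         if arr[start] == arr[mid]:
--             return mid
--         if arr[start] > arr[mid]:
--             return go(start, length // 2)
--         return go(mid, length - length // 2)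
--     return go(0, len(arr) - 1) if arr else None
-- ===== Notes on version B (the rewrite author's own statement) =====
-- stated objective: alternative
-- what changed: Replaced A's while loop over mutable (start,end) index pair with a recursive helper go(start,length) over the interval LENGTH (a natural number) that tests equality first, halves the length to recurse, and handles the empty list with an explicit top-level guard instead of the loop condition.
import Mathlib
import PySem

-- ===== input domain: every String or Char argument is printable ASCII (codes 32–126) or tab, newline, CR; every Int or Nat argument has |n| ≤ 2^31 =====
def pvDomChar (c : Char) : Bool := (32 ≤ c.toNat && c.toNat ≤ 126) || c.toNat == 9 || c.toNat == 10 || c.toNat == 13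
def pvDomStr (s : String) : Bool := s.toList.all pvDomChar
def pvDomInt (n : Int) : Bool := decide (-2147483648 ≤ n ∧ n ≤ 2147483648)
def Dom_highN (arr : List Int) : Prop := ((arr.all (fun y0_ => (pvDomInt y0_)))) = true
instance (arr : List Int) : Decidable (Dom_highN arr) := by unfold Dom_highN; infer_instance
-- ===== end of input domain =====

-- B replaces A's while loop over the mutable (start,end) pair by a recursive helper on (start, interval length : Nat); objective: alternative decomposition.

-- ===== PORT A =====
-- A's while loop as recursion over the mutable state (start, end); the Nat fuel is only a totality
-- guard (each iteration shrinks end - start, so length+1 steps are never exhausted); branch order as in A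
def highN.loop (arr : List Int) (fuel : Nat) (start e : Int) : Option Int :=
  match fuel with
  | 0 => none
  | fuel + 1 =>
    if start ≤ e then
      let mid := start + PySem.Int.floordiv (e - start) 2
      if PySem.List.pyGetD arr start 0 > PySem.List.pyGetD arr mid 0 then
        highN.loop arr fuel start mid
      else if PySem.List.pyGetD arr start 0 < PySem.List.pyGetD arr mid 0 then
        highN.loop arr fuel mid e
      else
        some mid
    else
      none

def highN (arr : List Int) : Option Int :=
  highN.loop arr (arr.length + 1) 0 ((arr.length : Int) - 1)

-- ===== PORT B =====
-- go recurses on the interval length (a Nat), testing equality first; structural: the length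
-- strictly shrinks in both recursive calls, so no fuel is needed
def highN_alt.go (arr : List Int) (start : Int) (length : Nat) : Option Int :=
  if h1 : PySem.List.pyGetD arr start 0 = PySem.List.pyGetD arr (start + ((length / 2 : Nat) : Int)) 0 then
    some (start + ((length / 2 : Nat) : Int))
  else if PySem.List.pyGetD arr start 0 > PySem.List.pyGetD arr (start + ((length / 2 : Nat) : Int)) 0 then
    highN_alt.go arr start (length / 2)
  else
    highN_alt.go arr (start + ((length / 2 : Nat) : Int)) (length - length / 2)
termination_by length
decreasing_by
  · rcases Nat.lt_or_ge length 2 with h | h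
    · exfalso; apply h1
      have h0 : length / 2 = 0 := by omega
      simp [h0]
    · omega
  · rcases Nat.lt_or_ge length 2 with h | h
    · exfalso; apply h1
      have h0 : length / 2 = 0 := by omega
      simp [h0]
    · omega

def highN_alt (arr : List Int) : Option Int :=
  if arr = [] then none
  else highN_alt.go arr 0 (arr.length - 1)

-- ===== PRECONDITION & SPEC =====
def Spec_highN (arr : List Int) (out : Option Int) : Prop := out = highN_alt arr
instance (arr : List Int) (out : Option Int) : Decidable (Spec_highN arr out) := by unfold Spec_highN; infer_instance

-- ===== CLAIM (what is proved, stated in full; the proofs are below) =====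
def Claim_equal_highN : Prop := ∀ (arr : List Int), Dom_highN arr → Spec_highN arr (highN arr)

-- ===== LEMMAS AND PROOFS =====
theorem mid_cast (s e : Int) (h : s ≤ e) :
    PySem.Int.floordiv (e - s) 2 = (((e - s).toNat / 2 : Nat) : Int) := by
  rw [PySem.Int.floordiv_eq_ediv_of_pos (by omega)]
  omega

theorem loop_eq_go (arr : List Int) (fuel : Nat) (s e : Int) (hse : s ≤ e)
    (hf : (e - s).toNat < fuel) :
    highN.loop arr fuel s e = highN_alt.go arr s (e - s).toNat := by
  induction fuel generalizing s e with
  | zero => omega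
  | succ fuel ih =>
    rw [highN.loop, highN_alt.go, if_pos hse, mid_cast s e hse]
    set a := PySem.List.pyGetD arr s 0 with ha
    set m := PySem.List.pyGetD arr (s + (((e - s).toNat / 2 : Nat) : Int)) 0 with hm
    have hhalf : a ≠ m → 1 ≤ (e - s).toNat / 2 := by
      intro hne
      by_contra hc
      have h0 : (e - s).toNat / 2 = 0 := by omega
      apply hne; rw [ha, hm, h0]; simp
    rcases lt_trichotomy a m with hlt | heq | hgt
    · -- A takes the start := mid branch; B recurses on the right half
      have hne : a ≠ m := by omega
      have hh := hhalf hne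
      rw [if_neg (by omega), if_pos hlt, dif_neg hne, if_neg (by omega)]
      have h1 : s + (((e - s).toNat / 2 : Nat) : Int) ≤ e := by omega
      have h2 : (e - (s + (((e - s).toNat / 2 : Nat) : Int))).toNat = (e - s).toNat - (e - s).toNat / 2 := by
        omega
      rw [ih _ _ h1 (by omega), h2]
    · rw [if_neg (by omega), if_neg (by omega), dif_pos heq]
    · -- A takes the end := mid branch; B recurses on the left half
      have hne : a ≠ m := by omega
      have hh := hhalf hne
      rw [if_pos hgt, dif_neg hne, if_pos hgt]
      have h1 : s ≤ s + (((e - s).toNat / 2 : Nat) : Int) := by omega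
      have h2 : (s + (((e - s).toNat / 2 : Nat) : Int) - s).toNat = (e - s).toNat / 2 := by omega
      rw [ih _ _ h1 (by rw [h2]; omega), h2]

-- ===== VERDICT (by name: the statement is the Claim_ definition above) =====
theorem highN_spec : Claim_equal_highN := by
  intro arr _
  unfold Spec_highN highN highN_alt
  rcases eq_or_ne arr [] with h | h
  · subst h; rfl
  · rw [if_neg h]
    have hn : 1 ≤ arr.length := List.length_pos_iff.mpr h
    have h1 : (0 : Int) ≤ (arr.length : Int) - 1 := by omega
    have h2 : (((arr.length : Int) - 1) - 0).toNat = arr.length - 1 := by omega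
    rw [loop_eq_go arr (arr.length + 1) 0 ((arr.length : Int) - 1) h1 (by omega), h2]
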